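-- pv_equiv track=rewrite | github.com/FilipKalcic1/novo | services/unified_router.py | _check_greeting
-- ===== SOURCE A (Python) =====
-- from typing import Dict, Any, List, Optional
--
-- def _check_greeting(query: str) -> Optional[str]:
--     """Check if query is a greeting and return response."""
--     query_lower = query.lower().strip()
--
--     greetings = {
--         "bok": "Bok! Kako vam mogu pomoći?",
--         "hej": "Hej! Kako vam mogu pomoći?",
--         "pozdrav": "Pozdrav! Kako vam mogu pomoći?",
--         "zdravo": "Zdravo! Kako vam mogu pomoći?",
--         "dobar dan": "Dobar dan! Kako vam mogu pomoći?",
--         "dobro jutro": "Dobro jutro! Kako vam mogu pomoći?",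
--         "dobra večer": "Dobra večer! Kako vam mogu pomoći?",
--         "hvala": "Nema na čemu! Trebate li još nešto?",
--         "thanks": "You're welcome! Need anything else?",
--         "help": "Mogu vam pomoći s:\n• Rezervacija vozila\n• Unos kilometraže\n• Prijava kvara\n• Informacije o vozilu",
--         "pomoc": "Mogu vam pomoći s:\n• Rezervacija vozila\n• Unos kilometraže\n• Prijava kvara\n• Informacije o vozilu",
--         "pomoć": "Mogu vam pomoći s:\n• Rezervacija vozila\n• Unos kilometraže\n• Prijava kvara\n• Informacije o vozilu",
--     }
--
--     for greeting, response in greetings.items():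
--         if query_lower == greeting or query_lower.startswith(greeting + " "):
--             return response
--
--     return None
-- ===== SOURCE B (Python) =====
-- from typing import Optional
--
-- _GREETINGS = {
--     "bok": "Bok! Kako vam mogu pomoći?",
--     "hej": "Hej! Kako vam mogu pomoći?",
--     "pozdrav": "Pozdrav! Kako vam mogu pomoći?",
--     "zdravo": "Zdravo! Kako vam mogu pomoći?",
--     "dobar dan": "Dobar dan! Kako vam mogu pomoći?",
--     "dobro jutro": "Dobro jutro! Kako vam mogu pomoći?",
--     "dobra večer": "Dobra večer! Kako vam mogu pomoći?",
--     "hvala": "Nema na čemu! Trebate li još nešto?",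
--     "thanks": "You're welcome! Need anything else?",
--     "help": "Mogu vam pomoći s:\n• Rezervacija vozila\n• Unos kilometraže\n• Prijava kvara\n• Informacije o vozilu",
--     "pomoc": "Mogu vam pomoći s:\n• Rezervacija vozila\n• Unos kilometraže\n• Prijava kvara\n• Informacije o vozilu",
--     "pomoć": "Mogu vam pomoći s:\n• Rezervacija vozila\n• Unos kilometraže\n• Prijava kvara\n• Informacije o vozilu",
-- }
--
-- def _check_greeting(query: str) -> Optional[str]:
--     """Check if query is a greeting and return response."""
--     q = query.lower().strip()
--     # candidate keys: the whole query, plus each prefix cut at a literal space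
--     candidates = [q] + [q[:i] for i, ch in enumerate(q) if ch == " "]
--     for cand in candidates:
--         if cand in _GREETINGS:
--             return _GREETINGS[cand]
--     return None
-- ===== Notes on version B (the rewrite author's own statement) =====
-- stated objective: idiomatic
-- what changed: Instead of scanning every greeting entry and testing it against the query, B generates the candidate keys from the query itself (the whole stripped lowercased query plus each prefix cut at a literal space position) and resolves them by direct dictionary lookups.
import Mathlib
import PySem

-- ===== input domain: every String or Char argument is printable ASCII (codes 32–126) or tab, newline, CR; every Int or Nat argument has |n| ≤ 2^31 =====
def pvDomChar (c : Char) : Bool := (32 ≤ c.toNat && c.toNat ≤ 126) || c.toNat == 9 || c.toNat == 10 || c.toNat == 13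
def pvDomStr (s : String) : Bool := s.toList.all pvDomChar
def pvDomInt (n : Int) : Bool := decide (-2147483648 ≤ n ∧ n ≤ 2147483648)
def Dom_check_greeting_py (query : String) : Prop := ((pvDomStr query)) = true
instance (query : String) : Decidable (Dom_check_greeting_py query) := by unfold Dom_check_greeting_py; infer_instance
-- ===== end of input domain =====

-- B replaces A's scan over every greeting entry by query-driven candidate generation
-- (the query plus its prefixes cut at literal spaces) with direct dict lookups (idiomatic).

-- the greeting table, common data of both programs
def pvGreetings : List (String × String) :=
  [ ("bok", "Bok! Kako vam mogu pomoći?"),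
    ("hej", "Hej! Kako vam mogu pomoći?"),
    ("pozdrav", "Pozdrav! Kako vam mogu pomoći?"),
    ("zdravo", "Zdravo! Kako vam mogu pomoći?"),
    ("dobar dan", "Dobar dan! Kako vam mogu pomoći?"),
    ("dobro jutro", "Dobro jutro! Kako vam mogu pomoći?"),
    ("dobra večer", "Dobra večer! Kako vam mogu pomoći?"),
    ("hvala", "Nema na čemu! Trebate li još nešto?"),
    ("thanks", "You're welcome! Need anything else?"),
    ("help", "Mogu vam pomoći s:\n• Rezervacija vozila\n• Unos kilometraže\n• Prijava kvara\n• Informacije o vozilu"),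
    ("pomoc", "Mogu vam pomoći s:\n• Rezervacija vozila\n• Unos kilometraže\n• Prijava kvara\n• Informacije o vozilu"),
    ("pomoć", "Mogu vam pomoći s:\n• Rezervacija vozila\n• Unos kilometraže\n• Prijava kvara\n• Informacije o vozilu") ]

-- ===== PORT A =====
-- "for greeting, response in greetings.items(): if query_lower == greeting or query_lower.startswith(greeting + ' '): return response"
def pvALoop (q : String) : List (String × String) → Option String
  | [] => none
  | (g, r) :: rest =>
      if q == g || PySem.Str.startswith q (g ++ " ") then some r else pvALoop q rest

def check_greeting_py (query : String) : Option String :=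
  let queryLower := PySem.Str.strip (PySem.Str.lower query)
  pvALoop queryLower pvGreetings

-- ===== PORT B =====
def pvGreetDict : PySem.Dict String String := PySem.Dict.ofList pvGreetings

-- "[q] + [q[:i] for i, ch in enumerate(q) if ch == ' ']"
def pvCands (q : String) : List String :=
  q :: (PySem.List.enumerate q.toList).filterMap
        (fun p => if p.2 = ' ' then some (PySem.Str.slice q none (some p.1)) else none)

-- "for cand in candidates: if cand in _GREETINGS: return _GREETINGS[cand]"
def pvBLoop : List String → Option String
  | [] => none
  | c :: rest =>
      match pvGreetDict.get? c with
      | some r => some r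
      | none => pvBLoop rest

def check_greeting_py_alt (query : String) : Option String :=
  let q := PySem.Str.strip (PySem.Str.lower query)
  pvBLoop (pvCands q)

-- ===== PRECONDITION & SPEC =====
def Spec_check_greeting_py (query : String) (out : Option String) : Prop := out = check_greeting_py_alt query
instance (query : String) (out : Option String) : Decidable (Spec_check_greeting_py query out) := by unfold Spec_check_greeting_py; infer_instance

-- ===== CLAIM (what is proved, stated in full; the proofs are below) =====
def Claim_equal_check_greeting_py : Prop := ∀ (query : String), Dom_check_greeting_py query → Spec_check_greeting_py query (check_greeting_py query)

-- ===== LEMMAS AND PROOFS =====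

-- A's match condition, named for the proofs
def pvMatches (q g : String) : Bool := q == g || PySem.Str.startswith q (g ++ " ")

theorem pvALoop_eq_find (q : String) (ps : List (String × String)) :
    pvALoop q ps = (ps.find? (fun p => pvMatches q p.1)).map Prod.snd := by
  induction ps with
  | nil => rfl
  | cons p rest ih =>
    obtain ⟨g, r⟩ := p
    cases h : (q == g || PySem.Str.startswith q (g ++ " ")) with
    | true =>
      simp only [pvALoop, List.find?, pvMatches, h, if_pos trivial]
      rfl
    | false =>
      simp only [pvALoop, List.find?, pvMatches, h]
      rw [if_neg (by simp), ih]
      rfl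

-- a "greeting boundary" prefix: g ++ ' ' sits at the front of l
theorem pv_snoc_prefix_iff (g l : List Char) (c : Char) :
    g ++ [c] <+: l ↔ l[g.length]? = some c ∧ l.take g.length = g := by
  constructor
  · rintro ⟨t, ht⟩
    have hl : l = g ++ c :: t := by simpa using ht.symm
    subst hl
    constructor
    · simp
    · simp
  · rintro ⟨hget, htake⟩
    have hlt : g.length < l.length := (List.getElem?_eq_some_iff.mp hget).1
    have hc : l[g.length] = c := by
      have := List.getElem?_eq_getElem hlt
      rw [this] at hget; exact Option.some.inj hget
    refine ⟨l.drop (g.length + 1), ?_⟩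
    conv_rhs => rw [← List.take_append_drop g.length l]
    rw [htake, List.drop_eq_getElem_cons hlt, hc]
    simp

theorem pv_matches_iff (q g : String) :
    pvMatches q g = true ↔ g = q ∨ g.toList ++ [' '] <+: q.toList := by
  unfold pvMatches
  rw [Bool.or_eq_true, beq_iff_eq]
  constructor
  · rintro (h | h)
    · exact Or.inl h.symm
    · refine Or.inr ?_
      have := (PySem.Chars.startswith_iff (s := q.toList) (p := (g ++ " ").toList)).mp (by simpa using h)
      simpa using this
  · rintro (h | h)
    · exact Or.inl h.symm
    · refine Or.inr ?_
      have : (g ++ " ").toList <+: q.toList := by simpa using h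
      simpa using (PySem.Chars.startswith_iff (s := q.toList) (p := (g ++ " ").toList)).mpr this

theorem pv_mem_cands_iff (q c : String) :
    c ∈ pvCands q ↔ pvMatches q c = true := by
  rw [pv_matches_iff]
  unfold pvCands
  simp only [List.mem_cons, List.mem_filterMap, PySem.List.mem_enumerate_iff]
  constructor
  · rintro (h | ⟨p, ⟨k, hk, hp⟩, hf⟩)
    · exact Or.inl h
    · subst hp
      split_ifs at hf with hsp
      refine Or.inr ?_
      have hc : c = PySem.Str.slice q none (some ((0 : Int) + (k : Int))) := (Option.some.inj hf).symm
      have hcl : c.toList = q.toList.take k := by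
        rw [hc, PySem.Str.toList_slice, PySem.Chars.slice_eq_listSlice]
        rw [show (0 : Int) + (k : Int) = ((k : Nat) : Int) by omega]
        exact PySem.List.slice_to_natCast _ _
      have hlen : c.toList.length = k := by
        rw [hcl, List.length_take]; omega
      rw [pv_snoc_prefix_iff, hlen]
      exact ⟨by rw [List.getElem?_eq_getElem hk]; exact congrArg some hsp, by rw [← hcl]⟩
  · rintro (h | h)
    · exact Or.inl h
    · rw [pv_snoc_prefix_iff] at h
      obtain ⟨hget, htake⟩ := h
      have hk : c.toList.length < q.toList.length := (List.getElem?_eq_some_iff.mp hget).1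
      have hsp : q.toList[c.toList.length] = ' ' := by
        rw [List.getElem?_eq_getElem hk] at hget; exact Option.some.inj hget
      refine Or.inr ⟨((0 : Int) + (c.toList.length : Int), q.toList[c.toList.length]), ⟨c.toList.length, hk, rfl⟩, ?_⟩
      rw [if_pos hsp]
      refine congrArg some (String.toList_inj.mp ?_)
      rw [PySem.Str.toList_slice, PySem.Chars.slice_eq_listSlice]
      rw [show (0 : Int) + (c.toList.length : Int) = ((c.toList.length : Nat) : Int) by omega]
      rw [PySem.List.slice_to_natCast, htake]

-- two distinct boundary prefixes of the same string: the shorter one plus ' ' prefixes the longer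
theorem pv_bp_comparable (l g1 g2 : List Char)
    (h1 : g1 = l ∨ g1 ++ [' '] <+: l) (h2 : g2 = l ∨ g2 ++ [' '] <+: l) (hne : g1 ≠ g2) :
    g1 ++ [' '] <+: g2 ∨ g2 ++ [' '] <+: g1 := by
  have key : ∀ a b : List Char, a ++ [' '] <+: l → b ++ [' '] <+: l → a.length < b.length →
      a ++ [' '] <+: b := by
    intro a b ha hb hab
    rcases List.prefix_or_prefix_of_prefix ha hb with h | h
    · have : a ++ [' '] = (b ++ [' ']).take (a.length + 1) := by
        have := List.prefix_iff_eq_take.mp h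
        simpa using this
      rw [this, List.take_append_of_le_length (by omega)]
      exact (List.take_prefix _ _)
    · exfalso
      have := h.length_le
      simp at this; omega
  rcases h1 with h1 | h1 <;> rcases h2 with h2 | h2
  · exact absurd (h1.trans h2.symm) hne
  · subst h1; exact Or.inr h2
  · subst h2; exact Or.inl h1
  · rcases Nat.lt_trichotomy g1.length g2.length with h | h | h
    · exact Or.inl (key _ _ h1 h2 h)
    · exfalso
      rcases List.prefix_or_prefix_of_prefix h1 h2 with hp | hp
      · exact hne (List.append_inj_left (hp.eq_of_length (by simp [h])) (by simp [h]))
      · exact hne (List.append_inj_left (hp.eq_of_length (by simp [h])) (by simp [h])).symm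
    · exact Or.inr (key _ _ h2 h1 h)

-- no greeting key, extended by a space, is a prefix of another greeting key
theorem pv_no_pref : ∀ p1 ∈ pvGreetings, ∀ p2 ∈ pvGreetings,
    ¬ (p1.1.toList ++ [' '] <+: p2.1.toList) := by decide

theorem pv_key_unique (q g1 g2 : String) (r1 r2 : String)
    (hm1 : (g1, r1) ∈ pvGreetings) (hm2 : (g2, r2) ∈ pvGreetings)
    (h1 : pvMatches q g1 = true) (h2 : pvMatches q g2 = true) : g1 = g2 := by
  by_contra hne
  have hne' : g1.toList ≠ g2.toList := fun h => hne (String.toList_inj.mp h)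
  have b1 : g1.toList = q.toList ∨ g1.toList ++ [' '] <+: q.toList := by
    rcases (pv_matches_iff q g1).mp h1 with h | h
    · exact Or.inl (by rw [h])
    · exact Or.inr h
  have b2 : g2.toList = q.toList ∨ g2.toList ++ [' '] <+: q.toList := by
    rcases (pv_matches_iff q g2).mp h2 with h | h
    · exact Or.inl (by rw [h])
    · exact Or.inr h
  rcases pv_bp_comparable q.toList g1.toList g2.toList b1 b2 hne' with h | h
  · exact pv_no_pref _ hm1 _ hm2 h
  · exact pv_no_pref _ hm2 _ hm1 h

theorem pv_items : pvGreetDict.items = pvGreetings := by decide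
theorem pv_nodup_keys : pvGreetDict.keys.Nodup := by decide

theorem pv_get?_mem {c r : String} (h : pvGreetDict.get? c = some r) : (c, r) ∈ pvGreetings := by
  rw [← pv_items]; exact PySem.Dict.mem_items_of_get?_eq_some _ h

theorem pv_mem_get? {g r : String} (h : (g, r) ∈ pvGreetings) : pvGreetDict.get? g = some r :=
  PySem.Dict.get?_of_mem_items _ (pv_items ▸ h) pv_nodup_keys

theorem pvBLoop_eq_none (cs : List String) (h : ∀ c ∈ cs, pvGreetDict.get? c = none) :
    pvBLoop cs = none := by
  induction cs with
  | nil => rfl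
  | cons c rest ih =>
    simp only [pvBLoop, h c (List.mem_cons_self), ih (fun x hx => h x (List.mem_cons_of_mem _ hx))]

theorem pvBLoop_eq_some (cs : List String) (g r : String) (hg : g ∈ cs)
    (hget : pvGreetDict.get? g = some r)
    (huniq : ∀ c ∈ cs, (pvGreetDict.get? c).isSome → c = g) :
    pvBLoop cs = some r := by
  induction cs with
  | nil => cases hg
  | cons c rest ih =>
    simp only [pvBLoop]
    cases hc : pvGreetDict.get? c with
    | some r' =>
      have hcg : c = g := huniq c List.mem_cons_self (by simp [hc])
      subst hcg
      rw [hc] at hget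
      simpa using hget
    | none =>
      have hgr : g ∈ rest := by
        rcases List.mem_cons.mp hg with h | h
        · subst h; rw [hc] at hget; cases hget
        · exact h
      exact ih hgr (fun x hx => huniq x (List.mem_cons_of_mem _ hx))

theorem pv_main (q : String) : pvALoop q pvGreetings = pvBLoop (pvCands q) := by
  rw [pvALoop_eq_find]
  cases hf : pvGreetings.find? (fun p => pvMatches q p.1) with
  | none =>
    rw [List.find?_eq_none] at hf
    simp only [Option.map_none]
    symm
    apply pvBLoop_eq_none
    intro c hc
    cases hg : pvGreetDict.get? c with
    | none => rfl
    | some r =>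
      exact absurd ((pv_mem_cands_iff q c).mp hc) (by simpa using hf _ (pv_get?_mem hg))
  | some p =>
    obtain ⟨g, r⟩ := p
    have hmatch : pvMatches q g = true := by simpa using List.find?_some hf
    have hmem : (g, r) ∈ pvGreetings := List.mem_of_find?_eq_some hf
    simp only [Option.map_some]
    symm
    apply pvBLoop_eq_some _ g r ((pv_mem_cands_iff q g).mpr hmatch) (pv_mem_get? hmem)
    intro c hc hs
    obtain ⟨r', hr'⟩ := Option.isSome_iff_exists.mp hs
    exact pv_key_unique q c g r' r (pv_get?_mem hr') hmem ((pv_mem_cands_iff q c).mp hc) hmatch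

-- ===== VERDICT (by name: the statement is the Claim_ definition above) =====
theorem check_greeting_py_spec : Claim_equal_check_greeting_py := by
  intro query _
  unfold Spec_check_greeting_py check_greeting_py check_greeting_py_alt
  exact pv_main _
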